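-- pv_equiv track=rewrite | github.com/yesnoj/ScommettiamoChe | pronostici_app.py | cm_find_next_giornata
-- ===== SOURCE A (Python) =====
-- def cm_find_next_giornata(results_by_g, calendar_by_g):
--     if calendar_by_g:
--         all_g = sorted(set(list(results_by_g) + list(calendar_by_g)))
--         for g in all_g:
--             if len(results_by_g.get(g, [])) < len(calendar_by_g.get(g, [])):
--                 return g
--         return (max(all_g) + 1) if all_g else 1
--     if results_by_g:
--         played = sorted(results_by_g)
--         for g in range(1, 39):
--             if g not in results_by_g or not results_by_g[g]:
--                 return g
--         return played[-1] + 1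
--     return 1
-- ===== SOURCE B (Python) =====
-- def cm_find_next_giornata(results_by_g, calendar_by_g):
--     if calendar_by_g:
--         best = None
--         mx = None
--         for g in list(results_by_g) + list(calendar_by_g):
--             if mx is None or g > mx:
--                 mx = g
--             if len(results_by_g.get(g, [])) < len(calendar_by_g.get(g, [])):
--                 if best is None or g < best:
--                     best = g
--         return best if best is not None else mx + 1
--     if results_by_g:
--         g = 1
--         while g < 39 and results_by_g.get(g):
--             g += 1
--         if g < 39:
--             return g
--         mx = None
--         for k in results_by_g:
--             if mx is None or k > mx:
--                 mx = k
--         return mx + 1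
--     return 1
-- ===== Notes on version B (the rewrite author's own statement) =====
-- stated objective: alternative
-- what changed: A sorts the deduplicated key set and scans it for the first incomplete matchday (and scans range(1,39) with early return in the results-only branch); B builds no set and never sorts: a single streaming pass over the raw key sequence maintains a running minimum of incomplete matchdays and a running maximum of all keys, and the results-only branch advances a while-loop counter and takes a running max for the fallback.
import Mathlib
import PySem

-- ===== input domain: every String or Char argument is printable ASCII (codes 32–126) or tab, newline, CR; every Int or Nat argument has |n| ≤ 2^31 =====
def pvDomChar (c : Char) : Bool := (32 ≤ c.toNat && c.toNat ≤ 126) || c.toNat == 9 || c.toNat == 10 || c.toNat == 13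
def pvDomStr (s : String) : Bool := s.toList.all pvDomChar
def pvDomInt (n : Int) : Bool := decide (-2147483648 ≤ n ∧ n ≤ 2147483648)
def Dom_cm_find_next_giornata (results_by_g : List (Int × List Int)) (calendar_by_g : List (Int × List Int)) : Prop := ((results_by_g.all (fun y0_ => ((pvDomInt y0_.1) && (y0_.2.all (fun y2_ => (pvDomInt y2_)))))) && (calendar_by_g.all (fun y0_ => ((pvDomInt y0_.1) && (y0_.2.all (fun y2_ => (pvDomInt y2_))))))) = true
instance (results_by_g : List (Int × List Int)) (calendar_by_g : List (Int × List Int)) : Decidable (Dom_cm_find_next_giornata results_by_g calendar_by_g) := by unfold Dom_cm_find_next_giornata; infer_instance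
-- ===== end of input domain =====

-- B replaces A's sort-then-scan-for-first by a single streaming pass over the raw key
-- sequence keeping running-min/running-max accumulators (no set, no sort, no intermediate
-- list), and A's range(1,39) scan by a counting while-loop (objective: alternative).

-- ===== PORT A =====
-- the incomplete-matchday test of A's first loop (len(results.get(g,[])) < len(calendar.get(g,[])))
def cmA_incomplete (results_by_g : List (Int × List Int)) (calendar_by_g : List (Int × List Int)) (g : Int) : Bool :=
  decide (((PySem.Dict.mk results_by_g).getD g []).length < ((PySem.Dict.mk calendar_by_g).getD g []).length)

-- 'g not in results_by_g or not results_by_g[g]' of A's second loop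
def cmA_missing (results_by_g : List (Int × List Int)) (g : Int) : Bool :=
  !(PySem.Dict.mk results_by_g).contains g || ((PySem.Dict.mk results_by_g).getD g []).isEmpty

def cm_find_next_giornata (results_by_g : List (Int × List Int)) (calendar_by_g : List (Int × List Int)) : Int :=
  if calendar_by_g ≠ [] then
    -- all_g = sorted(set(list(results_by_g) + list(calendar_by_g)))
    let all_g := PySem.List.sorted (PySem.Set.ofList (results_by_g.map (fun x => x.1) ++ calendar_by_g.map (fun x => x.1))) (fun x => x) false
    match all_g.find? (fun g => cmA_incomplete results_by_g calendar_by_g g) with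
    | some g => g
    | none =>
      match PySem.List.max? all_g (fun x => x) with
      | some m => m + 1
      | none => 1
  else if results_by_g ≠ [] then
    let played := PySem.List.sorted (results_by_g.map (fun x => x.1)) (fun x => x) false
    match (PySem.List.pyRange 1 39 1).find? (fun g => cmA_missing results_by_g g) with
    | some g => g
    | none => PySem.List.pyGetD played (-1) 0 + 1   -- played[-1] + 1; played ≠ [] here since results_by_g ≠ []
  else 1

-- ===== PORT B =====
-- same incompleteness test, as Source B writes it
def cmB_incomplete (results_by_g : List (Int × List Int)) (calendar_by_g : List (Int × List Int)) (g : Int) : Bool :=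
  decide (((PySem.Dict.mk results_by_g).getD g []).length < ((PySem.Dict.mk calendar_by_g).getD g []).length)

-- 'not results_by_g.get(g)' — Python truthiness of None / []
def cmB_notGet (results_by_g : List (Int × List Int)) (g : Int) : Bool :=
  match (PySem.Dict.mk results_by_g).get? g with
  | none => true
  | some v => v.isEmpty

-- 'if mx is None or k > mx: mx = k'
def cmB_maxStep (o : Option Int) (k : Int) : Option Int :=
  match o with
  | none => some k
  | some m => if k > m then some k else some m

-- 'if best is None or g < best: best = g'
def cmB_minStep (o : Option Int) (k : Int) : Option Int :=
  match o with
  | none => some k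
  | some b => if k < b then some k else some b

-- body of the 'for g in list(results_by_g) + list(calendar_by_g)' loop: update (best, mx)
def cmB_step (results_by_g : List (Int × List Int)) (calendar_by_g : List (Int × List Int))
    (st : Option Int × Option Int) (g : Int) : Option Int × Option Int :=
  (if cmB_incomplete results_by_g calendar_by_g g then cmB_minStep st.1 g else st.1,
   cmB_maxStep st.2 g)

-- 'g = 1; while g < 39 and results_by_g.get(g): g += 1' (fuel 38 = max number of iterations)
def cmB_while (results_by_g : List (Int × List Int)) (g : Int) : Nat → Int
  | 0 => g
  | fuel + 1 => if g < 39 && !(cmB_notGet results_by_g g) then cmB_while results_by_g (g + 1) fuel else g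

def cm_find_next_giornata_alt (results_by_g : List (Int × List Int)) (calendar_by_g : List (Int × List Int)) : Int :=
  if calendar_by_g ≠ [] then
    let st := (results_by_g.map (fun x => x.1) ++ calendar_by_g.map (fun x => x.1)).foldl
                (cmB_step results_by_g calendar_by_g) (none, none)
    match st.1 with
    | some b => b
    | none =>
      match st.2 with
      | some m => m + 1
      | none => 1   -- unreachable: the loop ran at least once since calendar_by_g ≠ []
  else if results_by_g ≠ [] then
    let g := cmB_while results_by_g 1 38
    if g < 39 then g
    else
      match (results_by_g.map (fun x => x.1)).foldl cmB_maxStep none with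
      | some m => m + 1
      | none => 1   -- unreachable: results_by_g ≠ []
  else 1

-- ===== PRECONDITION & SPEC =====
def Spec_cm_find_next_giornata (results_by_g : List (Int × List Int)) (calendar_by_g : List (Int × List Int)) (out : Int) : Prop := out = cm_find_next_giornata_alt results_by_g calendar_by_g
instance (results_by_g : List (Int × List Int)) (calendar_by_g : List (Int × List Int)) (out : Int) : Decidable (Spec_cm_find_next_giornata results_by_g calendar_by_g out) := by unfold Spec_cm_find_next_giornata; infer_instance

-- ===== CLAIM (what is proved, stated in full; the proofs are below) =====
def Claim_equal_cm_find_next_giornata : Prop := ∀ (results_by_g : List (Int × List Int)) (calendar_by_g : List (Int × List Int)), Dom_cm_find_next_giornata results_by_g calendar_by_g → Spec_cm_find_next_giornata results_by_g calendar_by_g (cm_find_next_giornata results_by_g calendar_by_g)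

-- ===== LEMMAS AND PROOFS =====

-- the paired fold of B splits into two independent folds
theorem pv_step_split (r c : List (Int × List Int)) (L : List Int) (st : Option Int × Option Int) :
    L.foldl (cmB_step r c) st =
      (L.foldl (fun o g => if cmB_incomplete r c g then cmB_minStep o g else o) st.1,
       L.foldl cmB_maxStep st.2) := by
  induction L generalizing st with
  | nil => rfl
  | cons a t ih => simpa [cmB_step] using ih _

-- the conditional min fold is the min fold over the filtered list
theorem pv_minfold_filter (p : Int → Bool) (L : List Int) (o : Option Int) :
    L.foldl (fun o g => if p g then cmB_minStep o g else o) o =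
      (L.filter p).foldl cmB_minStep o := by
  induction L generalizing o with
  | nil => rfl
  | cons a t ih =>
    by_cases hp : p a = true
    · simp [hp, ih]
    · simp [hp, ih]

-- running-max fold = Python max
theorem pv_maxfold_some (L : List Int) (m : Int) :
    L.foldl cmB_maxStep (some m) = some (L.foldl max m) := by
  induction L generalizing m with
  | nil => rfl
  | cons a t ih =>
    have hstep : cmB_maxStep (some m) a = some (max m a) := by
      simp only [cmB_maxStep]
      by_cases h : m < a
      · simp [h, max_eq_right h.le]
      · simp [h, max_eq_left (not_lt.mp h)]
    rw [List.foldl_cons, hstep, ih, List.foldl_cons]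

theorem pv_maxfold_eq_max? (L : List Int) :
    L.foldl cmB_maxStep none = PySem.List.max? L (fun x => x) := by
  cases L with
  | nil => rfl
  | cons a t =>
    rw [PySem.List.max?_id_cons]
    simpa [cmB_maxStep] using pv_maxfold_some t a

theorem pv_minfold_some (L : List Int) (m : Int) :
    L.foldl cmB_minStep (some m) = some (L.foldl min m) := by
  induction L generalizing m with
  | nil => rfl
  | cons a t ih =>
    have hstep : cmB_minStep (some m) a = some (min m a) := by
      simp only [cmB_minStep]
      by_cases h : a < m
      · simp [h, min_eq_right h.le]
      · simp [h, min_eq_left (not_lt.mp h)]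
    rw [List.foldl_cons, hstep, ih, List.foldl_cons]

theorem pv_minfold_eq_min? (L : List Int) :
    L.foldl cmB_minStep none = PySem.List.min? L (fun x => x) := by
  cases L with
  | nil => rfl
  | cons a t =>
    rw [PySem.List.min?_id_cons]
    simpa [cmB_minStep] using pv_minfold_some t a

-- min/max over Int lists only depend on the set of elements
theorem pv_min?_mem_eq (xs ys : List Int) (h : ∀ a, a ∈ xs ↔ a ∈ ys) :
    PySem.List.min? xs (fun x => x) = PySem.List.min? ys (fun x => x) := by
  cases hx : PySem.List.min? xs (fun x => x) with
  | none =>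
    rw [PySem.List.min?_eq_none_iff] at hx
    subst hx
    symm
    rw [PySem.List.min?_eq_none_iff, List.eq_nil_iff_forall_not_mem]
    intro a ha
    exact (List.not_mem_nil (a := a)) ((h a).mpr ha)
  | some m =>
    cases hy : PySem.List.min? ys (fun x => x) with
    | none =>
      rw [PySem.List.min?_eq_none_iff] at hy
      subst hy
      exact absurd ((h m).mp (PySem.List.min?_mem hx)) (List.not_mem_nil (a := m))
    | some m' =>
      have h1 : m ≤ m' := PySem.List.min?_isMin hx m' ((h m').mpr (PySem.List.min?_mem hy))
      have h2 : m' ≤ m := PySem.List.min?_isMin hy m ((h m).mp (PySem.List.min?_mem hx))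
      exact congrArg some (le_antisymm h1 h2)

theorem pv_max?_mem_eq (xs ys : List Int) (h : ∀ a, a ∈ xs ↔ a ∈ ys) :
    PySem.List.max? xs (fun x => x) = PySem.List.max? ys (fun x => x) := by
  cases hx : PySem.List.max? xs (fun x => x) with
  | none =>
    rw [PySem.List.max?_eq_none_iff] at hx
    subst hx
    symm
    rw [PySem.List.max?_eq_none_iff, List.eq_nil_iff_forall_not_mem]
    intro a ha
    exact (List.not_mem_nil (a := a)) ((h a).mpr ha)
  | some m =>
    cases hy : PySem.List.max? ys (fun x => x) with
    | none =>
      rw [PySem.List.max?_eq_none_iff] at hy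
      subst hy
      exact absurd ((h m).mp (PySem.List.max?_mem hx)) (List.not_mem_nil (a := m))
    | some m' =>
      have h1 : m' ≤ m := PySem.List.max?_isMax hx m' ((h m').mpr (PySem.List.max?_mem hy))
      have h2 : m ≤ m' := PySem.List.max?_isMax hy m ((h m).mp (PySem.List.max?_mem hx))
      exact congrArg some (le_antisymm h2 h1)

-- on a strictly increasing list, the first element satisfying p is min(filter p)
theorem pv_find?_eq_min?_filter (p : Int → Bool) (s : List Int) (hs : s.Pairwise (· < ·)) :
    s.find? p = PySem.List.min? (s.filter p) (fun x => x) := by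
  induction s with
  | nil => simp [PySem.List.min?]
  | cons a t ih =>
    have ht := hs.of_cons
    by_cases hp : p a = true
    · rw [List.find?_cons_of_pos hp, List.filter_cons_of_pos hp]
      cases hm : PySem.List.min? (a :: t.filter p) (fun x => x) with
      | none => rw [PySem.List.min?_eq_none_iff] at hm; simp at hm
      | some m =>
        have hmem := PySem.List.min?_mem hm
        have hmin := PySem.List.min?_isMin hm a (by simp)
        rcases List.mem_cons.mp hmem with h | h
        · simp [h]
        · have : a < m := (List.pairwise_cons.mp hs).1 m (List.mem_of_mem_filter h)
          omega
    · rw [List.find?_cons_of_neg (by simp [hp]), List.filter_cons_of_neg (by simp [hp])]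
      exact ih ht

-- the last element of the sorted copy of a nonempty list is max of the list, as a value
theorem pv_sorted_getLast_eq_max (l : List Int) (hl : l ≠ [])
    (hsl : PySem.List.sorted l (fun x => x) false ≠ []) :
    some ((PySem.List.sorted l (fun x => x) false).getLast hsl) = PySem.List.max? l (fun x => x) := by
  cases hm : PySem.List.max? l (fun x => x) with
  | none => rw [PySem.List.max?_eq_none_iff] at hm; exact absurd hm hl
  | some m =>
    have hperm := PySem.List.sorted_perm l (fun x => x) false
    have hlastmem : (PySem.List.sorted l (fun x => x) false).getLast hsl ∈
        PySem.List.sorted l (fun x => x) false := List.getLast_mem hsl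
    have h1 : (PySem.List.sorted l (fun x => x) false).getLast hsl ≤ m :=
      PySem.List.max?_isMax hm _ (hperm.mem_iff.mp hlastmem)
    have h2 : m ≤ (PySem.List.sorted l (fun x => x) false).getLast hsl := by
      have hmems : m ∈ PySem.List.sorted l (fun x => x) false :=
        hperm.mem_iff.mpr (PySem.List.max?_mem hm)
      obtain ⟨i, hi, hieq⟩ := List.mem_iff_getElem.mp hmems
      rw [List.getLast_eq_getElem hsl, ← hieq]
      exact PySem.List.sorted_id_getElem_mono l (by omega) (by omega)
    exact congrArg some (le_antisymm h1 h2)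

-- A's two membership tests coincide
theorem pv_missing_eq (r : List (Int × List Int)) (g : Int) :
    cmA_missing r g = cmB_notGet r g := by
  unfold cmA_missing cmB_notGet
  simp only [PySem.Dict.contains, PySem.Dict.getD, PySem.Dict.get?]
  cases h : List.find? (fun p => p.1 == g) r with
  | none =>
    have hany : r.any (fun p => p.1 == g) = false := by
      rw [List.any_eq_false]
      intro p hp
      simpa using List.find?_eq_none.mp h p hp
    simp [hany]
  | some p =>
    have hany : r.any (fun p => p.1 == g) = true := by
      refine List.any_eq_true.mpr ⟨p, List.mem_of_find?_eq_some h, ?_⟩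
      simpa using List.find?_some h
    simp [hany]

-- find? respects pointwise-equal predicates
theorem pv_find?_congr (p q : Int → Bool) (L : List Int) (h : ∀ x, p x = q x) :
    L.find? p = L.find? q := by
  induction L with
  | nil => rfl
  | cons a t ih =>
    by_cases hp : p a = true
    · rw [List.find?_cons_of_pos hp, List.find?_cons_of_pos (by rw [← h a]; exact hp)]
    · rw [List.find?_cons_of_neg (by simpa using hp),
        List.find?_cons_of_neg (by rw [← h a]; simpa using hp)]
      exact ih

-- B's while loop computes the first missing matchday in [g, 39), else 39
theorem pv_while_spec (r : List (Int × List Int)) :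
    ∀ (fuel : Nat) (g : Int), g + fuel = 39 →
      cmB_while r g fuel =
        (match (PySem.List.pyRange g 39 1).find? (fun x => cmB_notGet r x) with
         | some m => m
         | none => 39) := by
  intro fuel
  induction fuel with
  | zero =>
    intro g hg
    rw [PySem.List.pyRange_one_eq_nil (by omega)]
    simp [cmB_while]
    omega
  | succ n ih =>
    intro g hg
    have hlt : g < 39 := by omega
    rw [PySem.List.pyRange_one_cons hlt]
    by_cases hmiss : cmB_notGet r g = true
    · rw [List.find?_cons_of_pos hmiss]
      simp [cmB_while, hmiss]
    · rw [List.find?_cons_of_neg (by simp [hmiss])]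
      have hb : cmB_notGet r g = false := by simpa using hmiss
      simp only [cmB_while, hb]
      rw [if_pos (by simp [hlt])]
      exact ih (g + 1) (by omega)

theorem pv_main (r c : List (Int × List Int)) :
    cm_find_next_giornata r c = cm_find_next_giornata_alt r c := by
  unfold cm_find_next_giornata cm_find_next_giornata_alt
  by_cases hc : c ≠ []
  · rw [if_pos hc, if_pos hc]
    set K := r.map (fun x : Int × List Int => x.1) ++ c.map (fun x : Int × List Int => x.1) with hK
    set allg := PySem.List.sorted (PySem.Set.ofList K) (fun x => x) false with hallg
    have hmem : ∀ a, a ∈ allg ↔ a ∈ K := by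
      intro a
      rw [hallg, PySem.List.mem_sorted, PySem.Set.mem_ofList]
    have hfold := pv_step_split r c K (none, none)
    have hbest : (K.foldl (cmB_step r c) (none, none)).1
        = PySem.List.min? (allg.filter (fun g => cmA_incomplete r c g)) (fun x => x) := by
      rw [hfold]
      show K.foldl (fun o g => if cmB_incomplete r c g then cmB_minStep o g else o) none = _
      rw [pv_minfold_filter, pv_minfold_eq_min?]
      refine pv_min?_mem_eq _ _ (fun a => ?_)
      simp only [List.mem_filter, hmem a]
      constructor
      · rintro ⟨h1, h2⟩; exact ⟨h1, h2⟩
      · rintro ⟨h1, h2⟩; exact ⟨h1, h2⟩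
    have hmax : (K.foldl (cmB_step r c) (none, none)).2
        = PySem.List.max? allg (fun x => x) := by
      rw [hfold]
      show K.foldl cmB_maxStep none = _
      rw [pv_maxfold_eq_max?]
      exact pv_max?_mem_eq _ _ (fun a => (hmem a).symm)
    have hfind : allg.find? (fun g => cmA_incomplete r c g)
        = PySem.List.min? (allg.filter (fun g => cmA_incomplete r c g)) (fun x => x) :=
      pv_find?_eq_min?_filter _ _ (by rw [hallg]; exact PySem.List.sorted_ofList_pairwise_lt _)
    show (match allg.find? (fun g => cmA_incomplete r c g) with
      | some g => g
      | none =>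
        match PySem.List.max? allg (fun x => x) with
        | some m => m + 1
        | none => 1) =
      (match (K.foldl (cmB_step r c) (none, none)).1 with
      | some b => b
      | none =>
        match (K.foldl (cmB_step r c) (none, none)).2 with
        | some m => m + 1
        | none => 1)
    rw [hfind, hbest, hmax]
  · rw [ne_eq, not_not] at hc
    subst hc
    have hne : ¬(([] : List (Int × List Int)) ≠ []) := by simp
    rw [if_neg hne, if_neg hne]
    by_cases hr : r ≠ []
    · rw [if_pos hr, if_pos hr]
      have hfc : (PySem.List.pyRange 1 39 1).find? (fun g => cmA_missing r g)
          = (PySem.List.pyRange 1 39 1).find? (fun x => cmB_notGet r x) := by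
        exact pv_find?_congr _ _ _ (fun x => pv_missing_eq r x)
      have hw := pv_while_spec r 38 1 (by norm_num)
      rw [hfc]
      cases hf : (PySem.List.pyRange 1 39 1).find? (fun x => cmB_notGet r x) with
      | some m =>
        have hm : m ∈ PySem.List.pyRange 1 39 1 := List.mem_of_find?_eq_some hf
        have hmlt : m < 39 := ((PySem.List.mem_pyRange_one).mp hm).2
        rw [hf] at hw
        simp only [hw, if_pos hmlt]
      | none =>
        rw [hf] at hw
        simp only [hw]
        rw [if_neg (by omega)]
        -- fallback: played[-1] + 1 = max(results_by_g keys) + 1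
        have hrk : r.map (fun x : Int × List Int => x.1) ≠ [] := by simpa using hr
        have hsl : PySem.List.sorted (r.map (fun x : Int × List Int => x.1)) (fun x => x) false ≠ [] := by
          rw [ne_eq, PySem.List.sorted_eq_nil_iff]; exact hrk
        rw [PySem.List.pyGetD_neg_one _ _ hsl]
        have hlast := pv_sorted_getLast_eq_max (r.map (fun x => x.1)) hrk hsl
        rw [pv_maxfold_eq_max?]
        cases hmax : PySem.List.max? (r.map (fun x : Int × List Int => x.1)) (fun x => x) with
        | none => rw [PySem.List.max?_eq_none_iff] at hmax; exact absurd hmax hrk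
        | some m =>
          rw [hmax] at hlast
          simp only [Option.some.injEq] at hlast
          rw [hlast]
    · rw [ne_eq, not_not] at hr; subst hr; rfl

-- ===== VERDICT (by name: the statement is the Claim_ definition above) =====
theorem cm_find_next_giornata_spec : Claim_equal_cm_find_next_giornata := by
  intro r c _
  unfold Spec_cm_find_next_giornata
  exact pv_main r c
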